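-- pv_equiv track=rewrite | github.com/alejandroRdzGarza/final_great_agent_hackaton | Track_C/1_training/train_chain_patch.py | find_safe_and_break_steps
-- ===== SOURCE A (Python) =====
-- def find_safe_and_break_steps(entry, activation_metadata):
--     """Find last safe step (label=0) and first break step (label=1) for an entry."""
--     message_labels = entry.get('message_labels', [])
--     entry_idx = entry.get('entry_idx')
--     example_id = entry.get('row_idx')
--
--     if not message_labels:
--         return None, None
--
--     # Find last safe step (label=0)
--     safe_depth = None
--     for i, label in enumerate(message_labels, start=1):
--         if label == 0:
--             safe_depth = i
--         else:
--             break
--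
--     # Find first break step (label=1)
--     break_depth = None
--     for i, label in enumerate(message_labels, start=1):
--         if label == 1:
--             break_depth = i
--             break
--
--     return safe_depth, break_depth
-- ===== SOURCE B (Python) =====
-- def find_safe_and_break_steps(entry, activation_metadata):
--     """Find last safe step (label=0) and first break step (label=1) for an entry."""
--     labels = entry.get('message_labels', [])
--     entry_idx = entry.get('entry_idx')
--     example_id = entry.get('row_idx')
--
--     if not labels:
--         return None, None
--
--     # Single backward pass: at each position keep, for the suffix starting there,
--     # (length of its leading zero-run or None, 1-indexed first 1 or None).
--     safe = None
--     brk = None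
--     for label in reversed(labels):
--         safe = (1 + (safe or 0)) if label == 0 else None
--         brk = 1 if label == 1 else (None if brk is None else brk + 1)
--     return safe, brk
-- ===== Notes on version B (the rewrite author's own statement) =====
-- stated objective: alternative
-- what changed: Replaces A's two forward accumulator scans by one backward pass (a right fold) that maintains, for each suffix, both the leading-zero-run length and the 1-indexed first break, combining them at every element.
import Mathlib
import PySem

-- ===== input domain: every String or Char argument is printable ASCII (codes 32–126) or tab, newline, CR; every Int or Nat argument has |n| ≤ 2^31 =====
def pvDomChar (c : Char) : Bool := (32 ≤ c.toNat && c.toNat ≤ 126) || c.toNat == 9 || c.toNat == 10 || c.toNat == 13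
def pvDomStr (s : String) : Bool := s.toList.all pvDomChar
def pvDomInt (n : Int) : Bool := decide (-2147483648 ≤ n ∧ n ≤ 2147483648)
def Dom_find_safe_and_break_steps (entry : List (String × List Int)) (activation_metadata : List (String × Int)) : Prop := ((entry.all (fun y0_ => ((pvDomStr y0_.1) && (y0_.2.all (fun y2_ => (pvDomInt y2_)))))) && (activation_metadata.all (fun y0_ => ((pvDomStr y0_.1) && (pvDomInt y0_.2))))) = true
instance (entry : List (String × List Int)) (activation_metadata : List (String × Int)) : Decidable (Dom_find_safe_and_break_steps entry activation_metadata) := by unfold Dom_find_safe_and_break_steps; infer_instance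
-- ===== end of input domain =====

-- B replaces A's two forward accumulator scans by one backward pass (right fold) combining both results; objective: alternative.

-- ===== PORT A =====
-- A's first loop: 'for i, label in enumerate(labels, 1): if label == 0: safe_depth = i else: break'
def pvALoop1 : List Int → Int → Option Int → Option Int
  | [], _, safe => safe
  | l :: ls, i, safe => if l == 0 then pvALoop1 ls (i + 1) (some i) else safe

-- A's second loop: 'for i, label in enumerate(labels, 1): if label == 1: break_depth = i; break'
def pvALoop2 : List Int → Int → Option Int
  | [], _ => none
  | l :: ls, i => if l == 1 then some i else pvALoop2 ls (i + 1)

def find_safe_and_break_steps (entry : List (String × List Int)) (activation_metadata : List (String × Int)) : Option Int × Option Int :=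
  let message_labels := ((PySem.Dict.mk entry).get? "message_labels").getD []
  let _entry_idx := (PySem.Dict.mk entry).get? "entry_idx"
  let _example_id := (PySem.Dict.mk entry).get? "row_idx"
  if message_labels = [] then (none, none)
  else (pvALoop1 message_labels 1 none, pvALoop2 message_labels 1)

-- ===== PORT B =====
-- B's loop body: combine one label with the (safe, brk) pair of the suffix after it
def pvCombine (label : Int) (sb : Option Int × Option Int) : Option Int × Option Int :=
  ((if label == 0 then some (1 + sb.1.getD 0) else none),
   (if label == 1 then some 1 else sb.2.map (· + 1)))

-- B iterates over reversed(labels) updating (safe, brk); that is a right fold over labels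
def find_safe_and_break_steps_alt (entry : List (String × List Int)) (activation_metadata : List (String × Int)) : Option Int × Option Int :=
  let labels := ((PySem.Dict.mk entry).get? "message_labels").getD []
  let _entry_idx := (PySem.Dict.mk entry).get? "entry_idx"
  let _example_id := (PySem.Dict.mk entry).get? "row_idx"
  if labels = [] then (none, none)
  else labels.foldr pvCombine (none, none)

-- ===== PRECONDITION & SPEC =====
def Spec_find_safe_and_break_steps (entry : List (String × List Int)) (activation_metadata : List (String × Int)) (out : Option Int × Option Int) : Prop := out = find_safe_and_break_steps_alt entry activation_metadata
instance (entry : List (String × List Int)) (activation_metadata : List (String × Int)) (out : Option Int × Option Int) : Decidable (Spec_find_safe_and_break_steps entry activation_metadata out) := by unfold Spec_find_safe_and_break_steps; infer_instance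

-- ===== CLAIM (what is proved, stated in full; the proofs are below) =====
def Claim_equal_find_safe_and_break_steps : Prop := ∀ (entry : List (String × List Int)) (activation_metadata : List (String × Int)), Dom_find_safe_and_break_steps entry activation_metadata → Spec_find_safe_and_break_steps entry activation_metadata (find_safe_and_break_steps entry activation_metadata)

-- ===== LEMMAS AND PROOFS =====
-- proof-only helper: length of the leading run of zeros
def pvCountZeros : List Int → Int
  | [] => 0
  | l :: ls => if l == 0 then 1 + pvCountZeros ls else 0

theorem pvCountZeros_nonneg (ls : List Int) : 0 ≤ pvCountZeros ls := by
  induction ls with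
  | nil => simp [pvCountZeros]
  | cons l ls ih => by_cases h : l = 0 <;> simp [pvCountZeros, h] <;> omega

theorem pvALoop1_eq (ls : List Int) : ∀ (i : Int) (s : Option Int),
    pvALoop1 ls i s = if pvCountZeros ls > 0 then some (i + pvCountZeros ls - 1) else s := by
  induction ls with
  | nil => intro i s; simp [pvALoop1, pvCountZeros]
  | cons l ls ih =>
    intro i s
    by_cases h : l = 0
    · simp only [pvALoop1, pvCountZeros, h, beq_self_eq_true, if_true, ih]
      by_cases hk : pvCountZeros ls > 0
      · simp only [hk, if_true]
        have : 1 + pvCountZeros ls > 0 := by omega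
        simp only [this, if_true]
        congr 1; omega
      · have hk0 : pvCountZeros ls = 0 := by have := pvCountZeros_nonneg ls; omega
        simp only [hk, if_false, hk0]
        norm_num
    · have hb : (l == 0) = false := by simp [h]
      simp [pvALoop1, pvCountZeros, hb]

theorem pvFoldr_fst (ls : List Int) :
    (ls.foldr pvCombine (none, none)).1
      = if pvCountZeros ls > 0 then some (pvCountZeros ls) else none := by
  induction ls with
  | nil => simp [pvCountZeros]
  | cons l ls ih =>
    by_cases h : l = 0
    · simp only [List.foldr, pvCombine, h, beq_self_eq_true, if_true, pvCountZeros, ih]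
      by_cases hk : pvCountZeros ls > 0
      · have : 1 + pvCountZeros ls > 0 := by omega
        simp [hk, this]
      · have hk0 : pvCountZeros ls = 0 := by have := pvCountZeros_nonneg ls; omega
        simp [hk, hk0]
    · have hb : (l == 0) = false := by simp [h]
      simp [List.foldr, pvCombine, hb, pvCountZeros]

theorem pvALoop2_eq_foldr (ls : List Int) : ∀ (i : Int),
    pvALoop2 ls i = ((ls.foldr pvCombine (none, none)).2).map (fun n => n + (i - 1)) := by
  induction ls with
  | nil => intro i; simp [pvALoop2]
  | cons l ls ih =>
    intro i
    by_cases h : l = 1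
    · simp only [pvALoop2, h, beq_self_eq_true, if_true, List.foldr, pvCombine]
      simp [Option.map]
    · have hb : (l == 1) = false := by simp [h]
      simp only [pvALoop2, hb, if_false, List.foldr, pvCombine, ih]
      cases (ls.foldr pvCombine (none, none)).2 with
      | none => rfl
      | some n => simp [Option.map]

-- ===== VERDICT (by name: the statement is the Claim_ definition above) =====
theorem find_safe_and_break_steps_spec : Claim_equal_find_safe_and_break_steps := by
  intro entry activation_metadata _
  unfold Spec_find_safe_and_break_steps find_safe_and_break_steps find_safe_and_break_steps_alt
  simp only []
  set labels := ((PySem.Dict.mk entry).get? "message_labels").getD [] with hl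
  by_cases hempty : labels = []
  · simp [hempty]
  · simp only [hempty, if_false]
    have h2 : pvALoop2 labels 1 = (labels.foldr pvCombine (none, none)).2 := by
      rw [pvALoop2_eq_foldr]
      cases (labels.foldr pvCombine (none, none)).2 with
      | none => rfl
      | some n => simp
    have h1 : pvALoop1 labels 1 none = (labels.foldr pvCombine (none, none)).1 := by
      rw [pvALoop1_eq, pvFoldr_fst]
      by_cases hk : pvCountZeros labels > 0
      · simp only [hk, if_true]; congr 1; omega
      · simp [hk]
    rw [h1, h2]
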